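-- pv_equiv track=rewrite | github.com/StockerMC/advent-of-code | 2020/day_6.py | part_one
-- ===== SOURCE A (Python) =====
-- def part_one(lines: list[str]):
--     lines.append('')
--     a = set()
--     total = 0
--     for line in lines:
--         if line == '':
--             total += len(a)
--             a = set()
--             continue
--         a.update(line)
--
--     return total
-- ===== SOURCE B (Python) =====
-- def part_one(lines: list[str]):
--     lines.append('')
--     groups = []
--     cur = []
--     for line in lines:
--         if line == '':
--             groups.append(cur)
--             cur = []
--         else:
--             cur.append(line)
--     total = 0
--     for g in groups:
--         total += count_distinct(''.join(g))
--     return total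
--
--
-- def count_distinct(s: str) -> int:
--     t = sorted(s)
--     if not t:
--         return 0
--     return 1 + sum(1 for a, b in zip(t, t[1:]) if a != b)
-- ===== Notes on version B (the rewrite author's own statement) =====
-- stated objective: alternative
-- what changed: A makes one pass over the lines carrying a set that it flushes and resets at each blank line; B uses no set at all and works in two staged passes: first it splits the lines into a list of groups at the blank lines, then for each group it joins the group's lines, sorts the characters, and counts distinct characters as 1 + the number of adjacent unequal pairs in the sorted run.
import Mathlib
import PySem

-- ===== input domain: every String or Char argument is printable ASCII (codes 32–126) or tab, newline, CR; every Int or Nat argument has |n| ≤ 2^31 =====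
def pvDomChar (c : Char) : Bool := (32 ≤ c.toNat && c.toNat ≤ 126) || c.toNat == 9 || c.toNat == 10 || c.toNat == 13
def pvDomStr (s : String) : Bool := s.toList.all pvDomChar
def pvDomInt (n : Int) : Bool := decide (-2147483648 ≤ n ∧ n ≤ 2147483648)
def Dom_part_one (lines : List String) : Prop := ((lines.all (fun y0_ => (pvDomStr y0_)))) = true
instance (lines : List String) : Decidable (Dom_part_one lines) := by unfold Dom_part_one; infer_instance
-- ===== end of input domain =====

-- B replaces A's one-pass set-flushing scan with two staged passes and no set: split into
-- groups at blank lines, then count first occurrences per group by a prefix scan.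
-- Both A and B mutate their argument (lines.append('')); the equivalence proved here is
-- about the return value.

-- ===== PORT A =====
-- A: append '', then one fold carrying (current set, total), flushing the set at each blank line.
def part_one (lines : List String) : Int :=
  let lines := lines ++ [""]
  (lines.foldl
    (fun (st : PySem.Set Char × Int) line =>
      if line = "" then (([] : PySem.Set Char), st.2 + (st.1.length : Int))
      else (PySem.Set.update st.1 line.toList, st.2))
    (([] : PySem.Set Char), (0 : Int))).2

-- ===== PORT B =====
-- ''.join(g): joining with the empty separator is exactly concatenation of the lines' chars
def joinChars (g : List String) : List Char := (g.map String.toList).flatten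

-- count_distinct(s): sort the chars, then 1 + number of adjacent unequal pairs
-- (zip(t, t[1:]): t[1:] is the PySem slice from 1; the generator sum is the fold below)
def countDistinct (cs : List Char) : Int :=
  let t := PySem.List.sorted cs (fun c => c) false
  if t = [] then 0
  else
    1 + (t.zip (PySem.List.slice t (some 1) none)).foldl
          (fun u p => if p.1 ≠ p.2 then u + 1 else u) 0

def part_one_alt (lines : List String) : Int :=
  let lines := lines ++ [""]
  -- pass 1: split into groups at blank lines (groups.append(cur) / cur.append(line))
  let st := lines.foldl
    (fun (st : List (List String) × List String) line =>
      if line = "" then (st.1 ++ [st.2], ([] : List String))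
      else (st.1, st.2 ++ [line]))
    (([] : List (List String)), ([] : List String))
  -- pass 2: sum the first-occurrence counts of the joined groups
  st.1.foldl (fun total g => total + countDistinct (joinChars g)) 0

-- ===== PRECONDITION & SPEC =====
def Spec_part_one (lines : List String) (out : Int) : Prop := out = part_one_alt lines
instance (lines : List String) (out : Int) : Decidable (Spec_part_one lines out) := by unfold Spec_part_one; infer_instance

-- ===== CLAIM (what is proved, stated in full; the proofs are below) =====
def Claim_equal_part_one : Prop := ∀ (lines : List String), Dom_part_one lines → Spec_part_one lines (part_one lines)

-- ===== LEMMAS AND PROOFS =====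

-- the contribution of A's loop to 'total', starting from current set s
def flushA (s : PySem.Set Char) : List String → Int
  | [] => 0
  | l :: r =>
    if l = "" then (s.length : Int) + flushA ([] : PySem.Set Char) r
    else flushA (PySem.Set.update s l.toList) r

theorem foldA_snd (L : List String) : ∀ (s : PySem.Set Char) (t : Int),
    (L.foldl
      (fun (st : PySem.Set Char × Int) line =>
        if line = "" then (([] : PySem.Set Char), st.2 + (st.1.length : Int))
        else (PySem.Set.update st.1 line.toList, st.2)) (s, t)).2 = t + flushA s L := by
  induction L with
  | nil => intro s t; simp [flushA]
  | cons l r ih =>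
    intro s t
    by_cases h : l = "" <;> (simp [flushA, h, ih]; try ring)

theorem part_one_eq_flushA (lines : List String) :
    part_one lines = flushA ([] : PySem.Set Char) (lines ++ [""]) := by
  unfold part_one
  rw [foldA_snd]
  omega

-- the groups B's first pass produces, as a function of the pending group 'cur'
def groupsOf (cur : List String) : List String → List (List String)
  | [] => []
  | l :: r => if l = "" then cur :: groupsOf ([] : List String) r else groupsOf (cur ++ [l]) r

theorem foldB_fst (L : List String) : ∀ (gs : List (List String)) (cur : List String),
    (L.foldl
      (fun (st : List (List String) × List String) line =>
        if line = "" then (st.1 ++ [st.2], ([] : List String))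
        else (st.1, st.2 ++ [line])) (gs, cur)).1 = gs ++ groupsOf cur L := by
  induction L with
  | nil => intro gs cur; simp [groupsOf]
  | cons l r ih =>
    intro gs cur
    by_cases h : l = "" <;> simp [groupsOf, h, ih]

theorem foldB_sum (gs : List (List String)) : ∀ (t : Int),
    gs.foldl (fun total g => total + countDistinct (joinChars g)) t
      = t + (gs.map (fun g => countDistinct (joinChars g))).sum := by
  induction gs with
  | nil => intro t; simp
  | cons g r ih => intro t; simp [ih]; ring

-- the boundary count of the scan, as a structural recursion
def adjC : List Char → Int
  | [] => 0
  | [_] => 0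
  | a :: b :: r => (if a ≠ b then 1 else 0) + adjC (b :: r)

theorem foldZip_eq_adjC (t : List Char) : ∀ (u : Int),
    (t.zip t.tail).foldl (fun u p => if p.1 ≠ p.2 then u + 1 else u) u = u + adjC t := by
  induction t with
  | nil => intro u; simp [adjC]
  | cons a r ih =>
    intro u
    cases r with
    | nil => simp [adjC]
    | cons b r2 =>
      have hz : (a :: b :: r2).zip (a :: b :: r2).tail
          = (a, b) :: ((b :: r2).zip (b :: r2).tail) := rfl
      rw [hz, List.foldl_cons]
      by_cases h : a = b
      · rw [if_neg (by simp [h]), ih]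
        simp [adjC, h]
      · rw [if_pos (by simp [h]), ih]
        simp only [adjC, if_pos h]
        ring

-- on a ≤-sorted chain, 1 + boundary count = number of distinct elements
theorem adjC_chain (t : List Char) (hne : t ≠ [])
    (hp : t.Pairwise (· ≤ ·)) : 1 + adjC t = (t.toFinset.card : Int) := by
  induction t with
  | nil => exact absurd rfl hne
  | cons a r ih =>
    cases r with
    | nil => simp [adjC]
    | cons b r2 =>
      rcases List.pairwise_cons.mp hp with ⟨hale, hp2⟩
      by_cases h : a = b
      · subst h
        have hins : (a :: a :: r2).toFinset = (a :: r2).toFinset := by simp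
        have hadj : adjC (a :: a :: r2) = adjC (a :: r2) := by simp [adjC]
        rw [hadj, hins]
        exact ih (by simp) hp2
      · have hnm : a ∉ (b :: r2) := by
          intro hm
          rcases List.mem_cons.mp hm with h1 | h1
          · exact h h1
          · have h2 : b ≤ a := (List.pairwise_cons.mp hp2).1 a h1
            exact h (le_antisymm (hale b (by simp)) h2)
        have hcard : (a :: b :: r2).toFinset.card = (b :: r2).toFinset.card + 1 := by
          simp only [List.toFinset_cons (a := a)]
          rw [Finset.card_insert_of_notMem (by simpa using hnm)]
        have hih := ih (by simp) hp2
        simp only [adjC, if_pos h, hcard]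
        push_cast
        omega

-- the sort-then-scan count is exactly the number of distinct characters (len(set(cs)))
theorem countDistinct_eq_set_length (cs : List Char) :
    countDistinct cs = ((PySem.Set.ofList cs).length : Int) := by
  have hset : (PySem.Set.ofList cs).length = cs.toFinset.card := by
    rw [← List.toFinset_card_of_nodup (PySem.Set.nodup_ofList cs)]
    congr 1
    ext x
    simp [PySem.Set.mem_ofList]
  have hperm : (PySem.List.sorted cs (fun c : Char => c) false).Perm cs :=
    PySem.List.sorted_perm cs (fun c : Char => c) false
  by_cases hs : PySem.List.sorted cs (fun c : Char => c) false = []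
  · have hnil : cs = [] := List.nil_perm.mp (hs ▸ hperm)
    subst hnil
    rfl
  · have hchain : (PySem.List.sorted cs (fun c : Char => c) false).Pairwise (· ≤ ·) := by
      simpa using PySem.List.sorted_pairwise cs (fun c : Char => c)
    unfold countDistinct
    simp only [if_neg hs]
    rw [PySem.List.slice_from_one, foldZip_eq_adjC, zero_add,
      adjC_chain _ hs hchain, List.toFinset_eq_of_perm _ _ hperm, hset]

-- A's running set over the lines of a (partial) group = set of the joined group's chars
def setOfLines (ls : List String) : PySem.Set Char :=
  ls.foldl (fun s l => PySem.Set.update s l.toList) ([] : PySem.Set Char)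

theorem setOfLines_append (ls : List String) (l : String) :
    setOfLines (ls ++ [l]) = PySem.Set.update (setOfLines ls) l.toList := by
  simp [setOfLines, List.foldl_append]

theorem setOfLines_eq_ofList_join (ls : List String) :
    setOfLines ls = PySem.Set.ofList (joinChars ls) := by
  induction ls using List.reverseRecOn with
  | nil => rfl
  | append_singleton ls l ih =>
    rw [setOfLines_append, ih, PySem.Set.ofList_eq_foldl, PySem.Set.ofList_eq_foldl]
    simp [joinChars, PySem.Set.update, List.foldl_append]

-- joint invariant: A's flush-sum starting from the set of the pending group 'cur'
-- equals B's sum of per-group distinct counts over groupsOf cur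
theorem flushA_eq_sum (r : List String) : ∀ (cur : List String),
    flushA (setOfLines cur) r
      = ((groupsOf cur r).map (fun g => countDistinct (joinChars g))).sum := by
  induction r with
  | nil => intro cur; simp [flushA, groupsOf]
  | cons l r ih =>
    intro cur
    by_cases h : l = ""
    · subst h
      have hcur : (setOfLines cur).length = (PySem.Set.ofList (joinChars cur)).length := by
        rw [setOfLines_eq_ofList_join]
      have hA : flushA (setOfLines cur) ("" :: r) = ((setOfLines cur).length : Int) + flushA (setOfLines []) r := by
        simp [flushA, setOfLines]
      have hG : groupsOf cur ("" :: r) = cur :: groupsOf ([] : List String) r := by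
        simp [groupsOf]
      rw [hA, hG, ih, List.map_cons, List.sum_cons, countDistinct_eq_set_length,
        ← setOfLines_eq_ofList_join, hcur, ← setOfLines_eq_ofList_join]
    · simp only [flushA, groupsOf, if_neg h]
      rw [← setOfLines_append, ih]

-- ===== VERDICT (by name: the statement is the Claim_ definition above) =====
theorem part_one_spec : Claim_equal_part_one := by
  intro lines _
  show part_one lines = part_one_alt lines
  rw [part_one_eq_flushA]
  have halt : part_one_alt lines
      = ((groupsOf ([] : List String) (lines ++ [""])).map
          (fun g => countDistinct (joinChars g))).sum := by
    dsimp only [part_one_alt]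
    rw [foldB_fst, foldB_sum]
    simp
  rw [halt]
  exact flushA_eq_sum (lines ++ [""]) []
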